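-- pv_equiv track=rewrite | github.com/Kota1609/Financial-Neo4j-Knowledge-Graph-Streamlit | scripts/chunk_structured.py | pack_sentences
-- ===== SOURCE A (Python) =====
-- MAX_CHARS     = 750         # ≈ 180 - 220 tokens (OpenAI tiktoken estimate)
--
-- OVERLAP_CHARS = 120         # ~ 30 tokens sliding window
--
-- def pack_sentences(sents: list[str]) -> list[str]:
--     """
--     Greedy packer: group sentences ≤ MAX_CHARS with OVERLAP_CHARS overlap.
--     """
--     chunks: list[str] = []
--     buf: list[str]   = []
--     for s in sents:
--         trial = " ".join(buf + [s])
--         if len(trial) <= MAX_CHARS: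
--             buf.append(s)
--         else:
--             if buf:
--                 chunks.append(" ".join(buf))
--             # overlap last  overlap chunk_size
--             buf = [s]  # start new
--     if buf:
--         chunks.append(" ".join(buf))
--
--     # add overlaps
--     final: list[str] = []
--     for ch in chunks:
--         if final and OVERLAP_CHARS:
--             window = final[-1][-OVERLAP_CHARS:]
--             ch = f"{window} {ch}"
--         final.append(ch)
--     return final
-- ===== SOURCE B (Python) =====
-- MAX_CHARS     = 750
-- OVERLAP_CHARS = 120
--
-- def pack_sentences(sents: list[str]) -> list[str]:
--     """One-pass greedy packer: each chunk is finalized (overlap window prepended) as soon as it closes."""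
--     final: list[str] = []
--     buf: list[str] = []
--
--     def flush():
--         if buf:
--             ch = " ".join(buf)
--             if final and OVERLAP_CHARS:
--                 ch = final[-1][-OVERLAP_CHARS:] + " " + ch
--             final.append(ch)
--
--     for s in sents:
--         if len(" ".join(buf + [s])) <= MAX_CHARS:
--             buf.append(s)
--         else:
--             flush()
--             buf = [s]
--     flush()
--     return final
-- ===== Notes on version B (the rewrite author's own statement) =====
-- stated objective: simpler
-- what changed: Fuses A's two passes (greedy pack into an intermediate chunks list, then a second pass prepending overlap windows) into a single pass that finalizes each chunk with its overlap window as soon as it closes, dropping the intermediate list.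
import Mathlib
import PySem

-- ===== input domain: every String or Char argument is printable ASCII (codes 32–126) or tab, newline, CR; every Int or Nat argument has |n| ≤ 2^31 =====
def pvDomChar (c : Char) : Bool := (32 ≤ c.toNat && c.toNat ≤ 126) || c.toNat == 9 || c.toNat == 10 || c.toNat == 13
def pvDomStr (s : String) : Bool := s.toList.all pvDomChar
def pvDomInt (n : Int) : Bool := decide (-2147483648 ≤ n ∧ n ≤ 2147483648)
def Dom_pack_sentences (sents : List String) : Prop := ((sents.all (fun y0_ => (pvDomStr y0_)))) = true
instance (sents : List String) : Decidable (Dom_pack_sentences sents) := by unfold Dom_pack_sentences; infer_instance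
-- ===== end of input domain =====

-- B fuses A's two passes (greedy pack, then add overlap windows) into a single pass that
-- finalizes each chunk — overlap window prepended — as soon as it closes (objective: simpler).

def MAX_CHARS : Int := 750
def OVERLAP_CHARS : Int := 120

-- ===== PORT A =====
-- phase-1 loop body: state = (chunks, buf)
def pvStepA (st : List String × List String) (s : String) : List String × List String :=
  let trial := PySem.Str.join " " (st.2 ++ [s])
  if PySem.Str.len trial ≤ MAX_CHARS then (st.1, st.2 ++ [s])
  else (if st.2 ≠ [] then st.1 ++ [PySem.Str.join " " st.2] else st.1, [s])

-- phase-2 loop body: final.append(ch), with the overlap window of final[-1] prepended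
def pvAddOv (final : List String) (ch : String) : List String :=
  final ++ [if final ≠ [] ∧ OVERLAP_CHARS ≠ 0 then
              PySem.Str.join " " [PySem.Str.slice final.getLast! (some (-OVERLAP_CHARS)) none, ch]
            else ch]

def pack_sentences (sents : List String) : List String :=
  let st := sents.foldl pvStepA ([], [])
  let chunks := if st.2 ≠ [] then st.1 ++ [PySem.Str.join " " st.2] else st.1
  chunks.foldl pvAddOv []

-- ===== PORT B =====
-- Source B's flush(): finalize buf into final, prepending the overlap window
-- ('+' on str ported as String.ofList of the concatenated code-point lists: exact)
def pvFlushB (final : List String) (buf : List String) : List String :=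
  if buf ≠ [] then
    let ch := PySem.Str.join " " buf
    let ch := if final ≠ [] ∧ OVERLAP_CHARS ≠ 0 then
                String.ofList ((PySem.Str.slice final.getLast! (some (-OVERLAP_CHARS)) none).toList ++ ' ' :: ch.toList)
              else ch
    final ++ [ch]
  else final

-- Source B's loop body: state = (final, buf)
def pvStepB (st : List String × List String) (s : String) : List String × List String :=
  if PySem.Str.len (PySem.Str.join " " (st.2 ++ [s])) ≤ MAX_CHARS then (st.1, st.2 ++ [s])
  else (pvFlushB st.1 st.2, [s])

def pack_sentences_alt (sents : List String) : List String :=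
  let st := sents.foldl pvStepB ([], [])
  pvFlushB st.1 st.2

-- ===== PRECONDITION & SPEC =====
def Spec_pack_sentences (sents : List String) (out : List String) : Prop := out = pack_sentences_alt sents
instance (sents : List String) (out : List String) : Decidable (Spec_pack_sentences sents out) := by unfold Spec_pack_sentences; infer_instance

-- ===== CLAIM (what is proved, stated in full; the proofs are below) =====
def Claim_equal_pack_sentences : Prop := ∀ (sents : List String), Dom_pack_sentences sents → Spec_pack_sentences sents (pack_sentences sents)

-- ===== LEMMAS AND PROOFS =====

-- B's flush = A's phase-2 body applied to the joined buf (string glue: join " " [w, ch] = w + " " + ch)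
lemma flushB_eq (final buf : List String) :
    pvFlushB final buf =
      if buf ≠ [] then pvAddOv final (PySem.Str.join " " buf) else final := by
  unfold pvFlushB pvAddOv
  split_ifs <;>
    simp_all [PySem.Str.join, PySem.Chars.join, List.intercalate]

lemma stepA_pos (c b : List String) (s : String)
    (h : PySem.Str.len (PySem.Str.join " " (b ++ [s])) ≤ MAX_CHARS) :
    pvStepA (c, b) s = (c, b ++ [s]) := by
  unfold pvStepA; rw [if_pos h]

lemma stepA_neg (c b : List String) (s : String)
    (h : ¬ PySem.Str.len (PySem.Str.join " " (b ++ [s])) ≤ MAX_CHARS) :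
    pvStepA (c, b) s = (if b ≠ [] then c ++ [PySem.Str.join " " b] else c, [s]) := by
  unfold pvStepA; rw [if_neg h]

lemma stepB_pos (fin b : List String) (s : String)
    (h : PySem.Str.len (PySem.Str.join " " (b ++ [s])) ≤ MAX_CHARS) :
    pvStepB (fin, b) s = (fin, b ++ [s]) := by
  unfold pvStepB; rw [if_pos h]

lemma stepB_neg (fin b : List String) (s : String)
    (h : ¬ PySem.Str.len (PySem.Str.join " " (b ++ [s])) ≤ MAX_CHARS) :
    pvStepB (fin, b) s = (pvFlushB fin b, [s]) := by
  unfold pvStepB; rw [if_neg h]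

-- pvAddOv applied to a folded prefix is one more foldl step
lemma foldl_addOv_snoc (f c : List String) (x : String) :
    pvAddOv (c.foldl pvAddOv f) x = (c ++ [x]).foldl pvAddOv f := by
  rw [List.foldl_append]; rfl

-- loop-fusion invariant: running B's loop from (overlaid prefix, buf) and flushing
-- equals overlaying (A's phase 2) the chunks A's loop produces from (c, buf) over f
lemma fuse (sents : List String) : ∀ (c buf f : List String),
    pvFlushB (sents.foldl pvStepB ((c.foldl pvAddOv f), buf)).1
             (sents.foldl pvStepB ((c.foldl pvAddOv f), buf)).2
      = (if (sents.foldl pvStepA (c, buf)).2 ≠ []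
           then (sents.foldl pvStepA (c, buf)).1 ++ [PySem.Str.join " " (sents.foldl pvStepA (c, buf)).2]
           else (sents.foldl pvStepA (c, buf)).1).foldl pvAddOv f := by
  induction sents with
  | nil =>
      intro c buf f
      simp only [List.foldl_nil, flushB_eq]
      split_ifs with h
      · exact foldl_addOv_snoc f c _
      · rfl
  | cons s rest ih =>
      intro c buf f
      simp only [List.foldl_cons]
      by_cases h : PySem.Str.len (PySem.Str.join " " (buf ++ [s])) ≤ MAX_CHARS
      · rw [stepB_pos _ _ _ h, stepA_pos _ _ _ h]
        exact ih c (buf ++ [s]) f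
      · rw [stepB_neg _ _ _ h, stepA_neg _ _ _ h, flushB_eq (c.foldl pvAddOv f) buf]
        by_cases hb : buf = []
        · simp only [if_neg (show ¬ (buf ≠ []) from fun k => k hb)]
          exact ih c [s] f
        · simp only [if_pos (show buf ≠ [] from hb)]
          rw [foldl_addOv_snoc]
          exact ih (c ++ [PySem.Str.join " " buf]) [s] f

-- ===== VERDICT (by name: the statement is the Claim_ definition above) =====
theorem pack_sentences_spec : Claim_equal_pack_sentences := by
  intro sents _
  unfold Spec_pack_sentences pack_sentences pack_sentences_alt
  exact (fuse sents [] [] []).symm
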